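-- pv_equiv track=rewrite | github.com/VUB-HYDR/2022_Vanderkelen_etal_GMD | preprocessing/utils_irrigtopo.py | get_res_dependency
-- ===== SOURCE A (Python) =====
-- def get_res_dependency(pfaf_reservoirs, seg_dependency_dict):
--
--     """Get list of segments dependend per reservoir
--     input:  1. list with pfaf codes of reservoirs,
--             2. dictionary with per segment dependend reservoirs
--             3. dictionary with weights per segment dependend reservoir
--     output: res_dependency_dict[pfaf_res] = [pfaf_to_sum]
--     dictionary with first level keys: reservoir pfafs
--                             values: contributing river segments pfafs
--                             """
--
--
--     # dictionary to store dependency per reservoir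
--     res_dependency_dict = {}
--
--     for pfaf_res in pfaf_reservoirs:
--
--         pfafs_to_sum = []    # initialise list of segments to sum by
--         for pfaf_seg, lookup_pfaf_res in seg_dependency_dict.items():
--
--             if pfaf_res in lookup_pfaf_res:
--                 pfafs_to_sum.append(pfaf_seg)
--
--         # save dependend segments per reservoir in dict
--         res_dependency_dict[pfaf_res] = pfafs_to_sum
--     return res_dependency_dict
-- ===== SOURCE B (Python) =====
-- def get_res_dependency(pfaf_reservoirs, seg_dependency_dict):
--     # Inverted index: one pass over segments, appending each segment to the
--     # bucket of every reservoir it lists (deduplicated per segment).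
--     buckets = {pfaf_res: [] for pfaf_res in pfaf_reservoirs}
--     for pfaf_seg, lookup_pfaf_res in seg_dependency_dict.items():
--         for pfaf_res in dict.fromkeys(lookup_pfaf_res):
--             b = buckets.get(pfaf_res)
--             if b is not None:
--                 b.append(pfaf_seg)
--     return buckets
-- ===== Notes on version B (the rewrite author's own statement) =====
-- stated objective: faster
-- what changed: Replaced the reservoir-by-reservoir rescan of the whole segment dict (for each reservoir, scan every segment's dependency list) by a single pass over the segments that appends each segment to the bucket of every reservoir it lists (an inverted index).
import Mathlib
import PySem

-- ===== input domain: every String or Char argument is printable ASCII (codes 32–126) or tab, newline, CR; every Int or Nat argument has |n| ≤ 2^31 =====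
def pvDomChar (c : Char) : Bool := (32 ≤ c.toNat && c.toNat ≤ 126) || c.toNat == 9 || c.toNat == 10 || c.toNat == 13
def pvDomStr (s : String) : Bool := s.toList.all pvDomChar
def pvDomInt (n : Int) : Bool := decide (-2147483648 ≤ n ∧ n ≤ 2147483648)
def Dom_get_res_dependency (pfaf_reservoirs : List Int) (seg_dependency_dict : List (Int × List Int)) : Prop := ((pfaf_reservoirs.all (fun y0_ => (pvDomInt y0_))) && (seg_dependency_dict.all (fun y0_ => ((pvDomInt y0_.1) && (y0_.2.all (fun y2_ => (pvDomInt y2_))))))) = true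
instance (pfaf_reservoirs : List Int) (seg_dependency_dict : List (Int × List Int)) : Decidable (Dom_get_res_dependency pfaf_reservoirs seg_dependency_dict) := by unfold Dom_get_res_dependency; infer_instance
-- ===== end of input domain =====

-- B builds the reservoir->segments map in one pass over the segments (inverted index) instead of rescanning the whole segment dict per reservoir; objective: faster.


-- ===== PORT A =====
-- for pfaf_res in pfaf_reservoirs: scan all items of seg_dependency_dict, collect matching segments, store in dict
def get_res_dependency (pfaf_reservoirs : List Int) (seg_dependency_dict : List (Int × List Int)) : List (Int × List Int) :=
  (pfaf_reservoirs.foldl (fun acc pfaf_res =>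
      acc.insert pfaf_res
        (seg_dependency_dict.foldl (fun pfafs_to_sum p =>
            if p.2.contains pfaf_res then pfafs_to_sum ++ [p.1] else pfafs_to_sum) [])
    ) (PySem.Dict.empty : PySem.Dict Int (List Int))).items

-- ===== PORT B =====
-- buckets = {r: [] for r in pfaf_reservoirs}; then one pass over segments appending to each listed reservoir's bucket
-- (Python's `b = buckets.get(r); if b is not None: b.append(seg)` is the guarded in-place modify below;
--  `dict.fromkeys(lst)` is PySem.List.dedup)
def get_res_dependency_alt (pfaf_reservoirs : List Int) (seg_dependency_dict : List (Int × List Int)) : List (Int × List Int) :=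
  let buckets := pfaf_reservoirs.foldl
      (fun acc pfaf_res => acc.insert pfaf_res ([] : List Int))
      (PySem.Dict.empty : PySem.Dict Int (List Int))
  (seg_dependency_dict.foldl (fun acc p =>
      (PySem.List.dedup p.2).foldl (fun acc pfaf_res =>
          if acc.contains pfaf_res then acc.modify pfaf_res [] (· ++ [p.1]) else acc) acc)
    buckets).items

-- ===== PRECONDITION & SPEC =====
def Spec_get_res_dependency (pfaf_reservoirs : List Int) (seg_dependency_dict : List (Int × List Int)) (out : List (Int × List Int)) : Prop := out = get_res_dependency_alt pfaf_reservoirs seg_dependency_dict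
instance (pfaf_reservoirs : List Int) (seg_dependency_dict : List (Int × List Int)) (out : List (Int × List Int)) : Decidable (Spec_get_res_dependency pfaf_reservoirs seg_dependency_dict out) := by unfold Spec_get_res_dependency; infer_instance

-- ===== CLAIM (what is proved, stated in full; the proofs are below) =====
def Claim_equal_get_res_dependency : Prop := ∀ (pfaf_reservoirs : List Int) (seg_dependency_dict : List (Int × List Int)), Dom_get_res_dependency pfaf_reservoirs seg_dependency_dict → Spec_get_res_dependency pfaf_reservoirs seg_dependency_dict (get_res_dependency pfaf_reservoirs seg_dependency_dict)

-- ===== LEMMAS AND PROOFS =====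

-- segments whose dependency list contains k, in dict order (A's inner loop result)
def pvCol (sd : List (Int × List Int)) (k : Int) : List Int :=
  (sd.filter (fun p => p.2.contains k)).map (·.1)

-- B's per-reservoir step inside one segment
def pvBStep (s : Int) (acc : PySem.Dict Int (List Int)) (r : Int) : PySem.Dict Int (List Int) :=
  if acc.contains r then acc.modify r [] (· ++ [s]) else acc

-- B's per-segment step
def pvSegStep (acc : PySem.Dict Int (List Int)) (p : Int × List Int) : PySem.Dict Int (List Int) :=
  (PySem.List.dedup p.2).foldl (pvBStep p.1) acc

lemma pvCol_cons (p : Int × List Int) (sd : List (Int × List Int)) (k : Int) :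
    pvCol (p :: sd) k = (if p.2.contains k then [p.1] else []) ++ pvCol sd k := by
  simp [pvCol, List.filter_cons]
  split <;> simp

-- getD of an insert-loop over a fixed value function
lemma pvInsertFold_getD (g : Int → List Int) (rs : List Int)
    (d : PySem.Dict Int (List Int)) (k : Int) :
    ((rs.foldl (fun a r => a.insert r (g r)) d).getD k []) =
      if k ∈ rs then g k else d.getD k [] := by
  induction rs generalizing d with
  | nil => simp
  | cons r rs ih =>
      simp only [List.foldl_cons, ih, PySem.Dict.getD_insert, List.mem_cons]
      by_cases h1 : k ∈ rs <;> by_cases h2 : k = r <;> simp [h1, h2]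

lemma pvBStep_contains (s : Int) (d : PySem.Dict Int (List Int)) (r k : Int) :
    (pvBStep s d r).contains k = d.contains k := by
  unfold pvBStep
  by_cases hc : d.contains r
  · by_cases hk : k = r <;> simp [hc, hk, PySem.Dict.contains_modify]
  · simp [hc]

lemma pvBStep_getD (s : Int) (d : PySem.Dict Int (List Int)) (r k : Int) :
    (pvBStep s d r).getD k [] =
      if k = r ∧ d.contains k = true then d.getD k [] ++ [s] else d.getD k [] := by
  unfold pvBStep
  by_cases hc : d.contains r
  · rw [if_pos hc, PySem.Dict.getD_modify]
    by_cases hk : k = r <;> simp [hk, hc]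
  · rw [if_neg hc]
    by_cases hk : k = r
    · subst hk; simp [hc]
    · simp [hk]

lemma pvInnerFold_contains (s : Int) (ws : List Int) (d : PySem.Dict Int (List Int)) (k : Int) :
    ((ws.foldl (pvBStep s) d).contains k) = d.contains k := by
  induction ws generalizing d with
  | nil => rfl
  | cons r ws ih => simp [List.foldl_cons, ih, pvBStep_contains]

lemma pvInnerFold_getD (s : Int) (ws : List Int) (hw : ws.Nodup)
    (d : PySem.Dict Int (List Int)) (k : Int) :
    ((ws.foldl (pvBStep s) d).getD k []) =
      if k ∈ ws ∧ d.contains k = true then d.getD k [] ++ [s] else d.getD k [] := by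
  induction ws generalizing d with
  | nil => simp
  | cons r ws ih =>
      have hr : r ∉ ws := (List.nodup_cons.mp hw).1
      rw [List.foldl_cons, ih (List.nodup_cons.mp hw).2, pvBStep_contains, pvBStep_getD]
      by_cases h1 : k ∈ ws
      · have hkr : ¬ (k = r) := fun h => hr (h ▸ h1)
        by_cases h2 : d.contains k = true <;> simp [h1, h2, hkr]
      · by_cases h3 : k = r
        · subst h3
          by_cases h2 : d.contains k = true <;> simp [h1, h2]
        · simp [h1, h3]

lemma pvSegFold_getD (sd : List (Int × List Int)) (d : PySem.Dict Int (List Int)) (k : Int) :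
    ((sd.foldl pvSegStep d).getD k []) =
      if d.contains k = true then d.getD k [] ++ pvCol sd k else d.getD k [] := by
  induction sd generalizing d with
  | nil => simp [pvCol]
  | cons p sd ih =>
      rw [List.foldl_cons, ih, pvSegStep, pvInnerFold_contains,
        pvInnerFold_getD _ _ (PySem.List.nodup_dedup _), pvCol_cons]
      have hm : (k ∈ PySem.List.dedup p.2) ↔ p.2.contains k = true := by
        rw [PySem.List.mem_dedup, List.contains_iff_mem]
      by_cases hp : p.2.contains k = true
      · have hk2 : k ∈ p.2 := List.contains_iff_mem.mp hp
        by_cases hc : d.contains k = true <;>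
          simp [hc, hk2, List.append_assoc]
      · have hk2 : k ∉ p.2 := fun h => hp (List.contains_iff_mem.mpr h)
        by_cases hc : d.contains k = true <;> simp [hc, hk2]

lemma pvBStep_keys (s : Int) (d : PySem.Dict Int (List Int)) (r : Int) :
    (pvBStep s d r).keys = d.keys := by
  unfold pvBStep
  by_cases hc : d.contains r
  · rw [if_pos hc, PySem.Dict.keys_modify, PySem.Dict.keys_insert_of_contains _ _ hc]
  · rw [if_neg hc]

lemma pvSegFold_keys (sd : List (Int × List Int)) (d : PySem.Dict Int (List Int)) :
    ((sd.foldl pvSegStep d).keys) = d.keys := by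
  induction sd generalizing d with
  | nil => rfl
  | cons p sd ih =>
      rw [List.foldl_cons, ih, pvSegStep]
      generalize PySem.List.dedup p.2 = ws
      induction ws generalizing d with
      | nil => rfl
      | cons r ws ih2 => rw [List.foldl_cons, ih2, pvBStep_keys]

-- ===== VERDICT (by name: the statement is the Claim_ definition above) =====
theorem get_res_dependency_spec : Claim_equal_get_res_dependency := by
  intro rs sd _
  show get_res_dependency rs sd = get_res_dependency_alt rs sd
  have hAeq : get_res_dependency rs sd
      = (rs.foldl (fun acc r => acc.insert r
          (sd.foldl (fun l p => if p.2.contains r then l ++ [p.1] else l) []))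
          (PySem.Dict.empty : PySem.Dict Int (List Int))).items := rfl
  have hBeq : get_res_dependency_alt rs sd
      = (sd.foldl pvSegStep
          (rs.foldl (fun acc r => acc.insert r ([] : List Int))
            (PySem.Dict.empty : PySem.Dict Int (List Int)))).items := rfl
  rw [hAeq, hBeq]
  set dictA := rs.foldl (fun acc r =>
      acc.insert r (sd.foldl (fun l p => if p.2.contains r then l ++ [p.1] else l) []))
      (PySem.Dict.empty : PySem.Dict Int (List Int)) with hA
  set buckets := rs.foldl (fun acc r => acc.insert r ([] : List Int))
      (PySem.Dict.empty : PySem.Dict Int (List Int)) with hB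
  have hAkeys : dictA.keys = PySem.Set.ofList rs := by
    rw [hA, PySem.Dict.keys_foldl_insert, PySem.Dict.keys_empty, PySem.Set.update_nil_left]
  have hBkeys : buckets.keys = PySem.Set.ofList rs := by
    rw [hB, PySem.Dict.keys_foldl_insert, PySem.Dict.keys_empty, PySem.Set.update_nil_left]
  have hAnd : dictA.keys.Nodup := by
    rw [hA]; exact PySem.Dict.nodup_keys_foldl_insert _ _ _ (by simp)
  have hBnd : buckets.keys.Nodup := by
    rw [hB]; exact PySem.Dict.nodup_keys_foldl_insert _ _ _ (by simp)
  have hfold := pvSegFold_keys sd buckets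
  have hFnd : (sd.foldl pvSegStep buckets).keys.Nodup := hfold ▸ hBnd
  rw [PySem.Dict.items_eq_map_keys dictA hAnd [],
    PySem.Dict.items_eq_map_keys _ hFnd [], hfold, hAkeys, hBkeys]
  apply List.map_congr_left
  intro k hk
  have hkrs : k ∈ rs := (PySem.Set.mem_ofList rs k).mp hk
  have h1 : dictA.getD k [] = pvCol sd k := by
    rw [hA, pvInsertFold_getD, if_pos hkrs,
      PySem.List.foldl_append_if (fun q => q.2.contains k) (·.1) sd [], List.nil_append]
    rfl
  have hbc : buckets.contains k = true := by
    rw [PySem.Dict.contains_iff_mem_keys, hBkeys]; exact hk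
  have hb0 : buckets.getD k [] = [] := by
    rw [hB, pvInsertFold_getD, if_pos hkrs]
  have h2 : (sd.foldl pvSegStep buckets).getD k [] = pvCol sd k := by
    rw [pvSegFold_getD, if_pos hbc, hb0, List.nil_append]
  rw [h1, h2]
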